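-- pv_equiv track=rewrite | github.com/GU-DataLab/topic-modeling-textPrep | settings/common.py | word_tf_df
-- ===== SOURCE A (Python) =====
-- def word_tf_df(frequency, docs):
--     '''
--     :param frequency: passed explicitly so that you can increment existing frequencies if using in online mode
--     :param docs:
--     :return: updated frequency freq[0] = df, freq[1] = tf
--
--     '''
--     for doc in docs:
--         doc_word = []
--         for word in doc:
--             if word not in frequency:
--                 frequency[word] = [0, 0]
--             frequency[word][1] += 1
--             if word not in doc_word:
--                 frequency[word][0] += 1
--                 doc_word.append(word)
--     return frequency
-- ===== SOURCE B (Python) =====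
-- def word_tf_df(frequency, docs):
--     for doc in docs:
--         counts = {}
--         for word in doc:
--             counts[word] = counts.get(word, 0) + 1
--         for word, c in counts.items():
--             entry = frequency.setdefault(word, [0, 0])
--             entry[0] += 1
--             entry[1] += c
--     return frequency
-- ===== Notes on version B (the rewrite author's own statement) =====
-- stated objective: faster
-- what changed: B first tallies each document into a dict of word counts, then updates frequency once per unique word (one df bump, one bulk tf add via setdefault), replacing A's per-occurrence increments and the O(unique-words) doc_word list membership scan per occurrence.
import Mathlib
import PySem

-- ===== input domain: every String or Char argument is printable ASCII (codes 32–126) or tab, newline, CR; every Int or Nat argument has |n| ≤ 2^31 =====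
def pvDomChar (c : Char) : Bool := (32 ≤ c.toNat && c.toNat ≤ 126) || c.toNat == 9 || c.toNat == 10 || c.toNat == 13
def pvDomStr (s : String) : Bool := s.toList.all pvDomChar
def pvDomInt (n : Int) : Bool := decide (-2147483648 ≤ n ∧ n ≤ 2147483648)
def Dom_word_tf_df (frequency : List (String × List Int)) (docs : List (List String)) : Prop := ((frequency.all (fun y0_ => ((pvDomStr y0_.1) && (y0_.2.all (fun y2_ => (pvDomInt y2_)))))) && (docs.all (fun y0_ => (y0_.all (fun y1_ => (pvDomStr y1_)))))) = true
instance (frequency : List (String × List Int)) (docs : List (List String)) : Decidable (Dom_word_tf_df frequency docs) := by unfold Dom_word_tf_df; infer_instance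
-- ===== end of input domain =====

-- B tallies each document into a dict of word counts first, then updates `frequency` once per
-- unique word (one df bump, one bulk tf add), instead of A's per-occurrence increments with a
-- seen-list scan. Both Pythons mutate `frequency` in place identically; equality proved on the
-- returned value.

-- ===== PORT A =====
-- shared dict-as-assoc-list primitives (`word in frequency`, in-place value mutation)
def pvHasKey (f : List (String × List Int)) (w : String) : Bool := f.any (fun p => p.1 == w)
def pvModify (f : List (String × List Int)) (w : String) (g : List Int → List Int) : List (String × List Int) :=
  f.map (fun p => if p.1 == w then (p.1, g p.2) else p)

-- frequency[word][1] += 1  /  frequency[word][0] += 1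
def pvBumpTF (v : List Int) : List Int := v.set 1 (v.getD 1 0 + 1)
def pvBumpDF (v : List Int) : List Int := v.set 0 (v.getD 0 0 + 1)

-- one iteration of A's inner `for word in doc` over the state (frequency, doc_word)
def stepA (st : List (String × List Int) × List String) (w : String) : List (String × List Int) × List String :=
  let f1 := if pvHasKey st.1 w then st.1 else st.1 ++ [(w, [0, 0])]
  let f2 := pvModify f1 w pvBumpTF
  if st.2.contains w then (f2, st.2)
  else (pvModify f2 w pvBumpDF, st.2 ++ [w])

def word_tf_df (frequency : List (String × List Int)) (docs : List (List String)) : List (String × List Int) :=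
  docs.foldl (fun f doc => (doc.foldl stepA (f, ([] : List String))).1) frequency

-- ===== PORT B =====
-- counts[word] = counts.get(word, 0) + 1
def tallyB (doc : List String) : PySem.Dict String Int :=
  doc.foldl (fun d x => d.insert x (d.getD x 0 + 1)) PySem.Dict.empty

-- entry[0] += 1; entry[1] += c  applied to the (possibly fresh [0,0]) entry
def bumpB (c : Int) (v : List Int) : List Int :=
  let v1 := v.set 0 (v.getD 0 0 + 1)
  v1.set 1 (v1.getD 1 0 + c)

-- entry = frequency.setdefault(word, [0,0]); entry[0] += 1; entry[1] += c
def applyB (f : List (String × List Int)) (p : String × Int) : List (String × List Int) :=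
  if pvHasKey f p.1 then pvModify f p.1 (bumpB p.2)
  else f ++ [(p.1, bumpB p.2 [0, 0])]

def word_tf_df_alt (frequency : List (String × List Int)) (docs : List (List String)) : List (String × List Int) :=
  docs.foldl (fun f doc => (tallyB doc).items.foldl applyB f) frequency

-- ===== PRECONDITION & SPEC =====
-- Pre_ excludes exactly the inputs on which the Python A raises IndexError: a frequency entry
-- whose key occurs in some doc but whose value list is shorter than 2 (frequency[word][1] += 1).
def Pre_word_tf_df (frequency : List (String × List Int)) (docs : List (List String)) : Prop :=
  ∀ p ∈ frequency, (∃ doc ∈ docs, p.1 ∈ doc) → 2 ≤ p.2.length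
instance (frequency : List (String × List Int)) (docs : List (List String)) : Decidable (Pre_word_tf_df frequency docs) := by unfold Pre_word_tf_df; infer_instance

def pvWitness_word_tf_df : (List (String × List Int)) × List (List String) :=
  ([("a", [1, 2])], [["a", "b"], ["b"]])

def Spec_word_tf_df (frequency : List (String × List Int)) (docs : List (List String)) (out : List (String × List Int)) : Prop := out = word_tf_df_alt frequency docs
instance (frequency : List (String × List Int)) (docs : List (List String)) (out : List (String × List Int)) : Decidable (Spec_word_tf_df frequency docs out) := by unfold Spec_word_tf_df; infer_instance

-- ===== CLAIM (what is proved, stated in full; the proofs are below) =====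
def Claim_equal_word_tf_df : Prop := ∀ (frequency : List (String × List Int)) (docs : List (List String)), Dom_word_tf_df frequency docs → Pre_word_tf_df frequency docs → Spec_word_tf_df frequency docs (word_tf_df frequency docs)

-- ===== LEMMAS AND PROOFS =====

theorem hasKey_modify (f : List (String × List Int)) (w k : String) (g : List Int → List Int) :
    pvHasKey (pvModify f k g) w = pvHasKey f w := by
  unfold pvHasKey pvModify
  rw [List.any_map]
  congr 1
  funext q
  by_cases hq : q.1 = k <;> simp [hq]

theorem hasKey_append_single (f : List (String × List Int)) (w k : String) (v : List Int) :
    pvHasKey (f ++ [(k, v)]) w = (pvHasKey f w || k == w) := by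
  simp [pvHasKey]

theorem hasKey_applyB (f : List (String × List Int)) (p : String × Int) (w : String) :
    pvHasKey (applyB f p) w = (pvHasKey f w || p.1 == w) := by
  unfold applyB
  split
  · rename_i h
    rw [hasKey_modify]
    by_cases hw : p.1 = w
    · subst hw; simp [h]
    · simp [hw]
  · exact hasKey_append_single ..

theorem modify_of_not_hasKey (f : List (String × List Int)) (w : String) (g : List Int → List Int)
    (h : pvHasKey f w = false) : pvModify f w g = f := by
  unfold pvHasKey at h
  rw [List.any_eq_false] at h
  unfold pvModify
  conv_rhs => rw [← List.map_id f]
  apply List.map_congr_left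
  intro p hp
  have := h p hp
  simp_all

theorem modify_modify (f : List (String × List Int)) (w : String) (g h : List Int → List Int) :
    pvModify (pvModify f w g) w h = pvModify f w (fun v => h (g v)) := by
  unfold pvModify
  rw [List.map_map]
  apply List.map_congr_left
  intro p _
  by_cases hw : p.1 = w <;> simp [hw]

theorem modify_congr (f : List (String × List Int)) (w : String) (g h : List Int → List Int)
    (hc : ∀ v, (w, v) ∈ f → g v = h v) : pvModify f w g = pvModify f w h := by
  unfold pvModify
  apply List.map_congr_left
  intro p hp
  by_cases hw : p.1 = w
  · have : (w, p.2) ∈ f := by rw [← hw]; exact hp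
    simp [hw, hc _ this]
  · simp [hw]

theorem modify_append (f g : List (String × List Int)) (w : String) (h : List Int → List Int) :
    pvModify (f ++ g) w h = pvModify f w h ++ pvModify g w h := by
  simp [pvModify]

theorem applyB_modify_comm (f : List (String × List Int)) (k : String) (c : Int) (w : String)
    (g : List Int → List Int) (hne : k ≠ w) :
    applyB (pvModify f w g) (k, c) = pvModify (applyB f (k, c)) w g := by
  unfold applyB
  rw [hasKey_modify]
  split
  · -- key present: two modifies at distinct keys commute
    unfold pvModify
    rw [List.map_map, List.map_map]
    apply List.map_congr_left
    intro p _
    by_cases hk : p.1 = k <;> by_cases hw : p.1 = w <;>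
      simp_all [Function.comp]
  · rw [modify_append]
    simp [pvModify, if_neg (by simpa using hne)]

theorem foldl_applyB_modify_comm (l : List (String × Int)) (f : List (String × List Int))
    (w : String) (g : List Int → List Int) (hw : ∀ p ∈ l, p.1 ≠ w) :
    l.foldl applyB (pvModify f w g) = pvModify (l.foldl applyB f) w g := by
  induction l generalizing f with
  | nil => rfl
  | cons p rest ih =>
    simp only [List.foldl_cons]
    rw [show applyB (pvModify f w g) p = applyB (pvModify f w g) (p.1, p.2) from rfl,
        applyB_modify_comm f p.1 p.2 w g (hw p (by simp)),
        ih _ (fun q hq => hw q (by simp [hq]))]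

theorem foldl_applyB_hasKey (l : List (String × Int)) (f : List (String × List Int)) (w : String) :
    pvHasKey (l.foldl applyB f) w = (pvHasKey f w || l.any (fun p => p.1 == w)) := by
  induction l generalizing f with
  | nil => simp
  | cons p rest ih =>
    simp only [List.foldl_cons, List.any_cons, ih, hasKey_applyB, Bool.or_assoc]

-- the two value-cell identities (unconditional: List.set/getD out of range behave uniformly)
theorem bump_tf_bump (v : List Int) (n : Int) :
    pvBumpTF (bumpB n v) = bumpB (n + 1) v := by
  unfold pvBumpTF bumpB
  match v with
  | [] => rfl
  | [a] => rfl
  | a :: b :: t => simp [List.set, List.getD]; ring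

theorem bd_bt_eq_bumpB_one (v : List Int) :
    pvBumpDF (pvBumpTF v) = bumpB 1 v := by
  unfold pvBumpDF pvBumpTF bumpB
  match v with
  | [] => rfl
  | [a] => rfl
  | a :: b :: t => simp [List.set, List.getD]

theorem modify_applyB_self (f : List (String × List Int)) (w : String) (n : Int) :
    pvModify (applyB f (w, n)) w pvBumpTF = applyB f (w, n + 1) := by
  simp only [applyB]
  by_cases h : pvHasKey f w = true
  · rw [if_pos h, if_pos h, modify_modify]
    exact modify_congr _ _ _ _ (fun v _ => bump_tf_bump v n)
  · rw [if_neg h, if_neg h, modify_append, modify_of_not_hasKey f w _ (by simpa using h)]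
    simp only [pvModify, List.map_cons, List.map_nil]
    rw [if_pos (by simp), bump_tf_bump]

theorem map_keep_of_ne (l : List (String × Int)) (w : String) (q : String × Int)
    (hl : ∀ p ∈ l, p.1 ≠ w) :
    List.map (fun p => if (p.1 == w) = true then q else p) l = l := by
  conv_rhs => rw [← List.map_id l]
  apply List.map_congr_left
  intro p hp
  simp [hl p hp]

-- per-document loop fusion: A's inner loop with seen-list = c.keys over a frequency already
-- updated by counter c equals updating by the extended counter
theorem docL (doc : List String) (c : PySem.Dict String Int) (f : List (String × List Int))
    (hnd : c.keys.Nodup) :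
    doc.foldl stepA (c.items.foldl applyB f, c.keys)
      = ((doc.foldl (fun d x => d.insert x (d.getD x 0 + 1)) c).items.foldl applyB f,
         (doc.foldl (fun d x => d.insert x (d.getD x 0 + 1)) c).keys) := by
  induction doc generalizing c with
  | nil => rfl
  | cons w rest ih =>
    simp only [List.foldl_cons]
    have hstep : stepA (c.items.foldl applyB f, c.keys) w
        = ((c.insert w (c.getD w 0 + 1)).items.foldl applyB f,
           (c.insert w (c.getD w 0 + 1)).keys) := by
      by_cases hc : c.contains w = true
      · -- w already counted this doc: split items at w
        obtain ⟨n, hn⟩ : ∃ n, c.get? w = some n := by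
          rcases h' : c.get? w with _ | n
          · rw [PySem.Dict.contains_eq_isSome_get?, h'] at hc; simp at hc
          · exact ⟨n, rfl⟩
        have hmem : (w, n) ∈ c.items := PySem.Dict.mem_items_of_get?_eq_some c hn
        obtain ⟨l1, l2, hsplit⟩ := List.append_of_mem hmem
        have hkeys : c.keys = l1.map Prod.fst ++ w :: l2.map Prod.fst := by
          simp [PySem.Dict.keys, hsplit]
        have hnd' := hkeys ▸ hnd
        have hw1 : ∀ p ∈ l1, p.1 ≠ w := by
          intro p hp hpw
          have hm : w ∈ l1.map Prod.fst := by rw [← hpw]; exact List.mem_map_of_mem hp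
          exact List.disjoint_of_nodup_append hnd' hm (List.mem_cons_self ..)
        have hw2 : ∀ p ∈ l2, p.1 ≠ w := by
          intro p hp hpw
          have hm : w ∈ l2.map Prod.fst := by rw [← hpw]; exact List.mem_map_of_mem hp
          exact (List.nodup_cons.mp (List.nodup_append.mp hnd').2.1).1 hm
        have hgetD : c.getD w 0 = n := PySem.Dict.getD_of_get?_eq_some c 0 hn
        have hitems' : (c.insert w (c.getD w 0 + 1)).items = l1 ++ (w, n + 1) :: l2 := by
          rw [PySem.Dict.items_insert_of_contains c _ hc, hgetD, hsplit, List.map_append,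
            List.map_cons, map_keep_of_ne l1 w _ hw1, map_keep_of_ne l2 w _ hw2,
            if_pos (by simp)]
        have hwkeys : w ∈ c.keys := (PySem.Dict.contains_iff_mem_keys c w).mp hc
        have hseen : c.keys.contains w = true := by simpa using hwkeys
        have hF : pvHasKey (c.items.foldl applyB f) w = true := by
          rw [foldl_applyB_hasKey]
          have : c.items.any (fun p => p.1 == w) = true :=
            List.any_eq_true.mpr ⟨(w, n), hmem, by simp⟩
          simp [this]
        have hkeys' : (c.insert w (c.getD w 0 + 1)).keys = c.keys :=
          PySem.Dict.keys_insert_of_contains c _ hc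
        simp only [stepA, hF]
        simp [hwkeys, hkeys']
        rw [hitems', hsplit]
        simp only [List.foldl_append, List.foldl_cons]
        rw [← foldl_applyB_modify_comm l2 _ w _ hw2]
        rw [modify_applyB_self (l1.foldl applyB f) w n]
      · -- first occurrence of w in this doc
        have hc' : c.contains w = false := by simpa using hc
        have hwkeys : w ∉ c.keys := fun h => hc ((PySem.Dict.contains_iff_mem_keys c w).mpr h)
        have hseen : c.keys.contains w = false := by simpa using hwkeys
        have hgetD : c.getD w 0 = 0 := PySem.Dict.getD_of_not_contains c 0 hc'
        have hitems' : (c.insert w (c.getD w 0 + 1)).items = c.items ++ [(w, 1)] := by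
          rw [PySem.Dict.items_insert_of_not_contains c _ hc', hgetD]; norm_num
        have hkeys' : (c.insert w (c.getD w 0 + 1)).keys = c.keys ++ [w] :=
          PySem.Dict.keys_insert_of_not_contains c _ hc'
        have hcw : ∀ p ∈ c.items, p.1 ≠ w := by
          intro p hp hpw
          exact hwkeys (by rw [← hpw]; exact List.mem_map_of_mem hp)
        have hanyc : c.items.any (fun p => p.1 == w) = false := by
          simp only [List.any_eq_false]
          intro p hp; simpa using hcw p hp
        have hFkey : pvHasKey (c.items.foldl applyB f) w = pvHasKey f w := by
          rw [foldl_applyB_hasKey, hanyc, Bool.or_false]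
        simp only [stepA]
        simp [hwkeys, hkeys', hitems']
        by_cases hf : pvHasKey f w = true
        · -- w already a key of frequency: two in-place modifies vs one bulk modify
          have hFk : pvHasKey (c.items.foldl applyB f) w = true := by rw [hFkey, hf]
          simp only [hFk, if_true]
          rw [modify_modify]
          simp only [applyB, hFk, if_true]
          exact modify_congr _ _ _ _ (fun v _ => bd_bt_eq_bumpB_one v)
        · -- fresh word: append [0,0] then mutate, vs append the mutated cell
          have hFk : pvHasKey (c.items.foldl applyB f) w = false := by
            rw [hFkey]; simpa using hf
          simp only [hFk, Bool.false_eq_true, if_false]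
          rw [modify_append, modify_of_not_hasKey _ _ _ hFk]
          have h1 : pvModify [(w, ([0, 0] : List Int))] w pvBumpTF
              = [(w, ([0, 1] : List Int))] := by simp [pvModify, pvBumpTF]
          rw [h1, modify_append, modify_of_not_hasKey _ _ _ hFk]
          have h2 : pvModify [(w, ([0, 1] : List Int))] w pvBumpDF
              = [(w, ([1, 1] : List Int))] := by simp [pvModify, pvBumpDF]
          rw [h2]
          simp only [applyB, hFk, Bool.false_eq_true, if_false]
          rfl
    rw [hstep]
    exact ih _ (PySem.Dict.nodup_keys_insert c _ _ hnd)

theorem ports_agree (frequency : List (String × List Int)) (docs : List (List String)) :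
    word_tf_df frequency docs = word_tf_df_alt frequency docs := by
  unfold word_tf_df word_tf_df_alt
  induction docs generalizing frequency with
  | nil => rfl
  | cons doc rest ih =>
    simp only [List.foldl_cons]
    have h0 := docL doc PySem.Dict.empty frequency (by simp [PySem.Dict.keys_empty])
    have : (doc.foldl stepA (frequency, ([] : List String))).1
        = (tallyB doc).items.foldl applyB frequency := by
      have he : (PySem.Dict.empty : PySem.Dict String Int).items.foldl applyB frequency = frequency := rfl
      have hk : (PySem.Dict.empty : PySem.Dict String Int).keys = ([] : List String) := rfl
      rw [← he, ← hk, h0]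
      rfl
    rw [this]
    exact ih _

-- ===== VERDICT (by name: the statement is the Claim_ definition above) =====
theorem word_tf_df_spec : Claim_equal_word_tf_df := by
  intro frequency docs _ _
  unfold Spec_word_tf_df
  exact ports_agree frequency docs
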